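-- pv_equiv track=rewrite | github.com/Blackcockatoo/BSS-TamagotchiCipherum-LatticeTamaOS | tamaos/agent.py | _tags_to_channel
-- ===== SOURCE A (Python) =====
-- from typing import Any, Dict, List, Optional
--
-- def _tags_to_channel(tags: List[str]) -> str:
--     lowered = {tag.lower() for tag in tags}
--     if {"mirror", "symmetry", "palindrome"} & lowered:
--         return "mirror"
--     if {"shard", "entropy", "wild"} & lowered:
--         return "shard"
--     if {"flux", "flow", "dream"} & lowered:
--         return "flux"
--     if len(lowered) % 3 == 0:
--         return "mirror"
--     if len(lowered) % 3 == 1: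
--         return "shard"
--     return "flux"
-- ===== SOURCE B (Python) =====
-- _CHANNEL_PRIO = {
--     "mirror": 0, "symmetry": 0, "palindrome": 0,
--     "shard": 1, "entropy": 1, "wild": 1,
--     "flux": 2, "flow": 2, "dream": 2,
-- }
-- _CHANNEL_NAMES = ["mirror", "shard", "flux"]
--
-- def _tags_to_channel(tags):
--     lowered = {tag.lower() for tag in tags}
--     best = None
--     for t in lowered:
--         p = _CHANNEL_PRIO.get(t)
--         if p is not None and (best is None or p < best):
--             best = p
--     if best is None:
--         best = len(lowered) % 3
--     return _CHANNEL_NAMES[best]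
-- ===== Notes on version B (the rewrite author's own statement) =====
-- stated objective: idiomatic
-- what changed: Replaces the three hard-coded set-intersection branches by a keyword->priority table scanned in one pass keeping the minimum priority, with the len%3 fallback expressed as an index into the same channel-name list.
import Mathlib
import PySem

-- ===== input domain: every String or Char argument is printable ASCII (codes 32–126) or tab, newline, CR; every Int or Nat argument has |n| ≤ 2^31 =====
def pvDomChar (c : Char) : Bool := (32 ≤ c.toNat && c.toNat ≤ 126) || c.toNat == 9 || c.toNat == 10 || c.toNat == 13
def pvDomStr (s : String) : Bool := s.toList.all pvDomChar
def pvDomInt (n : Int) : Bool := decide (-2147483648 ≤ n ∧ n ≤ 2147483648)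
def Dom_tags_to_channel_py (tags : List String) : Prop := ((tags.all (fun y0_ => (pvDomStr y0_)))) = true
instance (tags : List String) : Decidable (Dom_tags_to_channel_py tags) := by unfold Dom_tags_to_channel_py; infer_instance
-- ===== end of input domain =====

-- B replaces A's three set-intersection branches by a keyword->priority dict scanned in one
-- pass keeping the minimum priority (idiomatic table-driven form); return value only.

-- ===== PORT A =====
def tags_to_channel_py (tags : List String) : String :=
  let lowered : PySem.Set String := PySem.Set.ofList (tags.map PySem.Str.lower)
  if PySem.Set.inter ["mirror", "symmetry", "palindrome"] lowered ≠ ([] : List String) then "mirror"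
  else if PySem.Set.inter ["shard", "entropy", "wild"] lowered ≠ ([] : List String) then "shard"
  else if PySem.Set.inter ["flux", "flow", "dream"] lowered ≠ ([] : List String) then "flux"
  else if lowered.length % 3 == 0 then "mirror"
  else if lowered.length % 3 == 1 then "shard"
  else "flux"

-- ===== PORT B =====
def pvChanPrio : PySem.Dict String Int :=
  PySem.Dict.ofList [("mirror", 0), ("symmetry", 0), ("palindrome", 0),
   ("shard", 1), ("entropy", 1), ("wild", 1),
   ("flux", 2), ("flow", 2), ("dream", 2)]

def pvChanNames : List String := ["mirror", "shard", "flux"]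

-- loop body of B: 'p = _CHANNEL_PRIO.get(t); if p is not None and (best is None or p < best): best = p'
def pvStep (best : Option Int) (t : String) : Option Int :=
  match PySem.Dict.get? pvChanPrio t with
  | none => best
  | some p =>
    match best with
    | none => some p
    | some b => if p < b then some p else best

def tags_to_channel_py_alt (tags : List String) : String :=
  let lowered : PySem.Set String := PySem.Set.ofList (tags.map PySem.Str.lower)
  let best : Option Int := lowered.foldl pvStep none
  let b : Int := best.getD ((lowered.length : Int) % 3)
  -- b is always 0, 1 or 2, so the Python indexing _CHANNEL_NAMES[b] never raises
  (PySem.List.pyGet? pvChanNames b).getD ""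

-- ===== PRECONDITION & SPEC =====
def Spec_tags_to_channel_py (tags : List String) (out : String) : Prop := out = tags_to_channel_py_alt tags
instance (tags : List String) (out : String) : Decidable (Spec_tags_to_channel_py tags out) := by unfold Spec_tags_to_channel_py; infer_instance

-- ===== CLAIM (what is proved, stated in full; the proofs are below) =====
def Claim_equal_tags_to_channel_py : Prop := ∀ (tags : List String), Dom_tags_to_channel_py tags → Spec_tags_to_channel_py tags (tags_to_channel_py tags)

-- ===== LEMMAS AND PROOFS =====

-- the minimum priority present in ls, as a branch expression matching A's tests
def pvMfn (ls : List String) : Option Int :=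
  if ls.contains "mirror" || ls.contains "symmetry" || ls.contains "palindrome" then some 0
  else if ls.contains "shard" || ls.contains "entropy" || ls.contains "wild" then some 1
  else if ls.contains "flux" || ls.contains "flow" || ls.contains "dream" then some 2
  else none

def pvOmin (a b : Option Int) : Option Int :=
  match b with
  | none => a
  | some p =>
    match a with
    | none => some p
    | some q => if p < q then some p else a

theorem pvStep_eq (acc : Option Int) (t : String) :
    pvStep acc t = pvOmin acc (PySem.Dict.get? pvChanPrio t) := by
  unfold pvStep pvOmin
  cases PySem.Dict.get? pvChanPrio t <;> cases acc <;> simp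

theorem pvOmin_eq (a b : Option Int) :
    pvOmin a b = match a, b with
      | none, b => b
      | a, none => a
      | some q, some p => some (min p q) := by
  cases a <;> cases b <;> simp only [pvOmin]
  split_ifs <;> simp [min_def] <;> omega

theorem pvOmin_assoc (a b c : Option Int) :
    pvOmin (pvOmin a b) c = pvOmin a (pvOmin b c) := by
  cases a <;> cases b <;> cases c <;> simp [pvOmin_eq] <;> omega

theorem pvGet_none (t : String)
    (h1 : t ≠ "mirror") (h2 : t ≠ "symmetry") (h3 : t ≠ "palindrome")
    (h4 : t ≠ "shard") (h5 : t ≠ "entropy") (h6 : t ≠ "wild")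
    (h7 : t ≠ "flux") (h8 : t ≠ "flow") (h9 : t ≠ "dream") :
    PySem.Dict.get? pvChanPrio t = none := by
  have hi : pvChanPrio.items = [("mirror",(0:Int)),("symmetry",0),("palindrome",0),
      ("shard",1),("entropy",1),("wild",1),("flux",2),("flow",2),("dream",2)] := by rfl
  simp [PySem.Dict.get?, hi, List.find?_eq_none, beq_iff_eq]
  aesop

theorem pvMfn_cons (t : String) (ls : List String) :
    pvOmin (PySem.Dict.get? pvChanPrio t) (pvMfn ls) = pvMfn (t :: ls) := by
  by_cases h1 : t = "mirror"
  · subst h1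
    rw [show PySem.Dict.get? pvChanPrio "mirror" = some 0 from rfl]
    simp only [pvMfn, List.contains_cons]
    simp
    split_ifs <;> simp [pvOmin_eq]
  by_cases h2 : t = "symmetry"
  · subst h2
    rw [show PySem.Dict.get? pvChanPrio "symmetry" = some 0 from rfl]
    simp only [pvMfn, List.contains_cons]
    simp
    split_ifs <;> simp [pvOmin_eq]
  by_cases h3 : t = "palindrome"
  · subst h3
    rw [show PySem.Dict.get? pvChanPrio "palindrome" = some 0 from rfl]
    simp only [pvMfn, List.contains_cons]
    simp
    split_ifs <;> simp [pvOmin_eq]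
  by_cases h4 : t = "shard"
  · subst h4
    rw [show PySem.Dict.get? pvChanPrio "shard" = some 1 from rfl]
    simp only [pvMfn, List.contains_cons]
    simp
    split_ifs <;> simp [pvOmin_eq]
  by_cases h5 : t = "entropy"
  · subst h5
    rw [show PySem.Dict.get? pvChanPrio "entropy" = some 1 from rfl]
    simp only [pvMfn, List.contains_cons]
    simp
    split_ifs <;> simp [pvOmin_eq]
  by_cases h6 : t = "wild"
  · subst h6
    rw [show PySem.Dict.get? pvChanPrio "wild" = some 1 from rfl]
    simp only [pvMfn, List.contains_cons]
    simp
    split_ifs <;> simp [pvOmin_eq]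
  by_cases h7 : t = "flux"
  · subst h7
    rw [show PySem.Dict.get? pvChanPrio "flux" = some 2 from rfl]
    simp only [pvMfn, List.contains_cons]
    simp
    split_ifs <;> simp [pvOmin_eq]
  by_cases h8 : t = "flow"
  · subst h8
    rw [show PySem.Dict.get? pvChanPrio "flow" = some 2 from rfl]
    simp only [pvMfn, List.contains_cons]
    simp
    split_ifs <;> simp [pvOmin_eq]
  by_cases h9 : t = "dream"
  · subst h9
    rw [show PySem.Dict.get? pvChanPrio "dream" = some 2 from rfl]
    simp only [pvMfn, List.contains_cons]
    simp
    split_ifs <;> simp [pvOmin_eq]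
  · rw [pvGet_none t h1 h2 h3 h4 h5 h6 h7 h8 h9]
    have hid : pvOmin none (pvMfn ls) = pvMfn ls := by cases pvMfn ls <;> rfl
    rw [hid]
    simp [pvMfn, List.contains_cons, beq_iff_eq, Ne.symm h1, Ne.symm h2, Ne.symm h3,
      Ne.symm h4, Ne.symm h5, Ne.symm h6, Ne.symm h7, Ne.symm h8, Ne.symm h9]

theorem pvFoldl (ls : List String) (acc : Option Int) :
    ls.foldl pvStep acc = pvOmin acc (pvMfn ls) := by
  induction ls generalizing acc with
  | nil => simp [pvMfn, pvOmin]
  | cons t ls ih =>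
    simp only [List.foldl_cons, ih, pvStep_eq, pvOmin_assoc, pvMfn_cons]

set_option maxHeartbeats 1600000 in
theorem pvMain (ls : List String) :
    (if PySem.Set.inter ["mirror", "symmetry", "palindrome"] ls ≠ ([] : List String) then "mirror"
     else if PySem.Set.inter ["shard", "entropy", "wild"] ls ≠ ([] : List String) then "shard"
     else if PySem.Set.inter ["flux", "flow", "dream"] ls ≠ ([] : List String) then "flux"
     else if ls.length % 3 == 0 then "mirror"
     else if ls.length % 3 == 1 then "shard"
     else "flux")
    = (PySem.List.pyGet? pvChanNames
        ((ls.foldl pvStep none).getD ((ls.length : Int) % 3))).getD "" := by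
  have hfold : ls.foldl pvStep none = pvMfn ls := by
    rw [pvFoldl]; cases pvMfn ls <;> rfl
  rw [hfold]
  have hA1 : (PySem.Set.inter ["mirror", "symmetry", "palindrome"] ls ≠ ([] : List String)) ↔
      ("mirror" ∈ ls ∨ "symmetry" ∈ ls ∨ "palindrome" ∈ ls) := by
    simp [PySem.Set.inter]; tauto
  have hA2 : (PySem.Set.inter ["shard", "entropy", "wild"] ls ≠ ([] : List String)) ↔
      ("shard" ∈ ls ∨ "entropy" ∈ ls ∨ "wild" ∈ ls) := by
    simp [PySem.Set.inter]; tauto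
  have hA3 : (PySem.Set.inter ["flux", "flow", "dream"] ls ≠ ([] : List String)) ↔
      ("flux" ∈ ls ∨ "flow" ∈ ls ∨ "dream" ∈ ls) := by
    simp [PySem.Set.inter]; tauto
  have hB1 : ((ls.contains "mirror" || ls.contains "symmetry" || ls.contains "palindrome") = true) ↔
      ("mirror" ∈ ls ∨ "symmetry" ∈ ls ∨ "palindrome" ∈ ls) := by simp only [Bool.or_eq_true, List.contains_iff_mem, or_assoc]
  have hB2 : ((ls.contains "shard" || ls.contains "entropy" || ls.contains "wild") = true) ↔
      ("shard" ∈ ls ∨ "entropy" ∈ ls ∨ "wild" ∈ ls) := by simp only [Bool.or_eq_true, List.contains_iff_mem, or_assoc]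
  have hB3 : ((ls.contains "flux" || ls.contains "flow" || ls.contains "dream") = true) ↔
      ("flux" ∈ ls ∨ "flow" ∈ ls ∨ "dream" ∈ ls) := by simp only [Bool.or_eq_true, List.contains_iff_mem, or_assoc]
  unfold pvMfn
  by_cases c1 : ("mirror" ∈ ls ∨ "symmetry" ∈ ls ∨ "palindrome" ∈ ls)
  · rw [if_pos (hA1.mpr c1), if_pos (hB1.mpr c1)]
    simp [PySem.List.pyGet?, PySem.List.pyIdx?, pvChanNames]
  · rw [if_neg (fun h => c1 (hA1.mp h)), if_neg (fun h => c1 (hB1.mp h))]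
    by_cases c2 : ("shard" ∈ ls ∨ "entropy" ∈ ls ∨ "wild" ∈ ls)
    · rw [if_pos (hA2.mpr c2), if_pos (hB2.mpr c2)]
      simp [PySem.List.pyGet?, PySem.List.pyIdx?, pvChanNames]
    · rw [if_neg (fun h => c2 (hA2.mp h)), if_neg (fun h => c2 (hB2.mp h))]
      by_cases c3 : ("flux" ∈ ls ∨ "flow" ∈ ls ∨ "dream" ∈ ls)
      · rw [if_pos (hA3.mpr c3), if_pos (hB3.mpr c3)]
        simp [PySem.List.pyGet?, PySem.List.pyIdx?, pvChanNames]
      · rw [if_neg (fun h => c3 (hA3.mp h)), if_neg (fun h => c3 (hB3.mp h))]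
        rw [Option.getD_none]
        have hcast : ((ls.length : Int) % 3) = ((ls.length % 3 : Nat) : Int) := by omega
        rw [hcast]
        have h3 : ls.length % 3 = 0 ∨ ls.length % 3 = 1 ∨ ls.length % 3 = 2 := by omega
        rcases h3 with h | h | h <;> rw [h] <;>
          simp [PySem.List.pyGet?, PySem.List.pyIdx?, pvChanNames]

-- ===== VERDICT (by name: the statement is the Claim_ definition above) =====
theorem tags_to_channel_py_spec : Claim_equal_tags_to_channel_py := by
  intro tags _
  unfold Spec_tags_to_channel_py tags_to_channel_py tags_to_channel_py_alt
  exact pvMain _
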